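-- pv_equiv track=rewrite | github.com/shiva-nagendra/ai-30week-journey | day_23.py | detect_gaps
-- ===== SOURCE A (Python) =====
-- def detect_gaps(road):
--     gaps = []
--     start_index = None
--
--     for i in range (len(road)):
--         current_spot = road[i]
--         if current_spot == 0 and start_index is None:
--             start_index = i
--         elif current_spot == 1 and start_index is not None:
--             length = i - start_index
--             gaps.append((start_index,length))
--             start_index = None
--
--     if start_index is not None:
--         length_of_finalgap = len(road)-start_index
--         gaps.append((start_index,length_of_finalgap))
--
--
--     def gap_length(gap_tuple):
--      return gap_tuple[1]
--
--
--     sorted_gaps = sorted(gaps, key=gap_length, reverse=True)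
--     return sorted_gaps
-- ===== SOURCE B (Python) =====
-- def detect_gaps(road):
--     n = len(road)
--     boundaries = [i for i, x in enumerate(road) if x == 1] + [n]
--     gaps = []
--     seg_start = 0
--     for b in boundaries:
--         j = next((k for k in range(seg_start, b) if road[k] == 0), None)
--         if j is not None:
--             gaps.append((j, b - j))
--         seg_start = b + 1
--     return sorted(gaps, key=lambda g: g[1], reverse=True)
-- ===== Notes on version B (the rewrite author's own statement) =====
-- stated objective: alternative
-- what changed: A walks the list once with an open-gap state machine; B instead collects the positions of 1s as segment boundaries (plus a sentinel at len(road)) and scans each delimited segment for its first 0, emitting (start, boundary-start); both end with the same stable sort by length descending.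
import Mathlib
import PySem

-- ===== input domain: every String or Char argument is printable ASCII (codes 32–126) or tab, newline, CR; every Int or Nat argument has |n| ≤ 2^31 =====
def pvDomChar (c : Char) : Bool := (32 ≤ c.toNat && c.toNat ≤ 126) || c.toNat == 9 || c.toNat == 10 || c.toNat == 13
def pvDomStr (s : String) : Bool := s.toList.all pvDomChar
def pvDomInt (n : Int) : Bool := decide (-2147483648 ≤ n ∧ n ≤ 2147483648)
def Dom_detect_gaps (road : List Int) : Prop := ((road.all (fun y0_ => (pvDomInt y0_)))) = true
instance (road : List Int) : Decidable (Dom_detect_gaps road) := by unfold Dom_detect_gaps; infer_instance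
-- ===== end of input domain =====

-- B replaces A's per-element state machine by collecting the positions of 1s as segment
-- boundaries and scanning each segment for its first 0 (objective: alternative decomposition).


-- ===== PORT A =====
-- loop body of A's for-loop (state: gaps so far, open start_index)
def pvStepA (road : List Int) (st : List (Int × Int) × Option Int) (i : Int) :
    List (Int × Int) × Option Int :=
  let cur := PySem.List.pyGetD road i 0   -- road[i]; i ∈ range(len(road)), always in range
  match st.2 with
  | none => if cur = 0 then (st.1, some i) else st
  | some s => if cur = 1 then (st.1 ++ [(s, i - s)], none) else st

def detect_gaps (road : List Int) : List (Int × Int) :=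
  let n : Int := road.length
  let res := (PySem.List.pyRange 0 n 1).foldl (pvStepA road) ([], none)
  let gaps :=
    match res.2 with
    | some s => res.1 ++ [(s, n - s)]
    | none => res.1
  PySem.List.sorted gaps (fun g => g.2) true

-- ===== PORT B =====
-- loop body of B's boundary loop (state: gaps so far, seg_start)
def pvStepB (road : List Int) (st : List (Int × Int) × Int) (b : Int) :
    List (Int × Int) × Int :=
  match (PySem.List.pyRange st.2 b 1).find? (fun k => PySem.List.pyGetD road k 0 == 0) with
  | some j => (st.1 ++ [(j, b - j)], b + 1)
  | none => (st.1, b + 1)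

def detect_gaps_alt (road : List Int) : List (Int × Int) :=
  let n : Int := road.length
  let boundaries :=
    ((PySem.List.enumerate road 0).filter (fun p => p.2 == 1)).map (fun p => p.1) ++ [n]
  let res := boundaries.foldl (pvStepB road) ([], 0)
  PySem.List.sorted res.1 (fun g => g.2) true

-- ===== PRECONDITION & SPEC =====
def Spec_detect_gaps (road : List Int) (out : List (Int × Int)) : Prop := out = detect_gaps_alt road
instance (road : List Int) (out : List (Int × Int)) : Decidable (Spec_detect_gaps road out) := by unfold Spec_detect_gaps; infer_instance

-- ===== CLAIM (what is proved, stated in full; the proofs are below) =====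
def Claim_equal_detect_gaps : Prop := ∀ (road : List Int), Dom_detect_gaps road → Spec_detect_gaps road (detect_gaps road)

-- ===== LEMMAS AND PROOFS =====

-- canonical gap list of the current suffix; i = current index, st = open-gap start
def gcan : Int → List Int → Option Int → List (Int × Int)
  | _, [], none => []
  | i, [], some s => [(s, i - s)]
  | i, x :: xs, none =>
      if x = 0 then gcan (i+1) xs (some i) else gcan (i+1) xs none
  | i, x :: xs, some s =>
      if x = 1 then (s, i - s) :: gcan (i+1) xs none else gcan (i+1) xs (some s)

-- A's post-loop flush of a still-open gap
def pvFlushAt (res : List (Int × Int) × Option Int) (n : Int) : List (Int × Int) :=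
  match res.2 with
  | some s => res.1 ++ [(s, n - s)]
  | none => res.1

lemma drop_head (R : List Int) (k : Nat) (x : Int) (xs : List Int)
    (h : R.drop k = x :: xs) : R[k]? = some x ∧ R.drop (k+1) = xs := by
  constructor
  · have h1 : (R.drop k)[0]? = some x := by simp [h]
    rw [List.getElem?_drop] at h1
    simpa using h1
  · rw [← List.tail_drop, h]
    rfl

lemma A_loop (R : List Int) (xs : List Int) (k : Nat) (acc : List (Int × Int))
    (st : Option Int) (h : R.drop k = xs) :
    pvFlushAt ((PySem.List.pyRange (k : Int) ((k : Int) + (xs.length : Int)) 1).foldl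
        (pvStepA R) (acc, st)) ((k : Int) + (xs.length : Int))
      = acc ++ gcan (k : Int) xs st := by
  induction xs generalizing k acc st with
  | nil =>
      simp only [List.length_nil, Nat.cast_zero, add_zero]
      rw [PySem.List.pyRange_one_eq_nil (le_refl _)]
      cases st <;> simp [pvFlushAt, gcan]
  | cons x xs ih =>
      obtain ⟨hx, hdrop⟩ := drop_head R k x xs h
      have hc : (k : Int) + 1 = ((k + 1 : Nat) : Int) := by push_cast; ring
      have hb : (k : Int) + ((x :: xs).length : Int)
          = ((k + 1 : Nat) : Int) + (xs.length : Int) := by push_cast [List.length_cons]; ring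
      rw [hb, PySem.List.pyRange_one_cons (by push_cast; omega)]
      rw [List.foldl_cons, hc]
      cases st with
      | none =>
          by_cases h0 : x = 0
          · have : pvStepA R (acc, none) (k : Int) = (acc, some (k : Int)) := by
              simp [pvStepA, List.getD, hx, h0]
            rw [this, ih (k+1) acc (some (k : Int)) hdrop]
            simp [gcan, h0]
          · have : pvStepA R (acc, none) (k : Int) = (acc, none) := by
              simp [pvStepA, List.getD, hx, h0]
            rw [this, ih (k+1) acc none hdrop]
            simp [gcan, h0]
      | some s =>
          by_cases h1 : x = 1
          · have : pvStepA R (acc, some s) (k : Int) = (acc ++ [(s, (k : Int) - s)], none) := by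
              simp [pvStepA, List.getD, hx, h1]
            rw [this, ih (k+1) _ none hdrop]
            simp [gcan, h1]
          · have : pvStepA R (acc, some s) (k : Int) = (acc, some s) := by
              simp [pvStepA, List.getD, hx, h1]
            rw [this, ih (k+1) acc (some s) hdrop]
            simp [gcan, h1]

lemma B_loop (R : List Int) (xs : List Int) (k : Nat) (s : Int) (acc : List (Int × Int))
    (h : R.drop k = xs) (hs : s ≤ (k : Int)) :
    (((((PySem.List.enumerate xs (k : Int)).filter (fun p => p.2 == 1)).map (fun p => p.1))
        ++ [(k : Int) + (xs.length : Int)]).foldl (pvStepB R) (acc, s)).1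
      = acc ++ gcan (k : Int) xs
          ((PySem.List.pyRange s (k : Int) 1).find? (fun j => PySem.List.pyGetD R j 0 == 0)) := by
  induction xs generalizing k s acc with
  | nil =>
      simp only [PySem.List.enumerate_nil, List.filter_nil, List.map_nil, List.length_nil,
        Nat.cast_zero, add_zero, List.nil_append, List.foldl_cons, List.foldl_nil]
      cases hf : (PySem.List.pyRange s (k : Int) 1).find? (fun j => PySem.List.pyGetD R j 0 == 0) with
      | none => simp [pvStepB, hf, gcan]
      | some j => simp [pvStepB, hf, gcan]
  | cons x xs ih =>
      obtain ⟨hx, hdrop⟩ := drop_head R k x xs h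
      have hc : (k : Int) + 1 = ((k + 1 : Nat) : Int) := by push_cast; ring
      have hb : (k : Int) + ((x :: xs).length : Int)
          = ((k + 1 : Nat) : Int) + (xs.length : Int) := by push_cast [List.length_cons]; ring
      have hsplit : (PySem.List.pyRange s ((k : Int) + 1) 1).find?
            (fun j => PySem.List.pyGetD R j 0 == 0)
          = ((PySem.List.pyRange s (k : Int) 1).find? (fun j => PySem.List.pyGetD R j 0 == 0)).orElse
              (fun _ => if x == 0 then some (k : Int) else none) := by
        rw [PySem.List.pyRange_one_succ_right hs, List.find?_append]
        simp [List.getD, hx]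
      rw [PySem.List.enumerate_cons]
      by_cases h1 : x = 1
      · subst h1
        simp only [List.filter_cons, show ((1 : Int) == 1) = true from rfl, if_true,
          List.map_cons, List.cons_append, List.foldl_cons]
        cases hf : (PySem.List.pyRange s (k : Int) 1).find? (fun j => PySem.List.pyGetD R j 0 == 0) with
        | some j =>
            have hstep : pvStepB R (acc, s) (k : Int)
                = (acc ++ [(j, (k : Int) - j)], (k : Int) + 1) := by
              simp [pvStepB, hf]
            rw [hstep, hb, hc, ih (k+1) _ _ hdrop (le_refl _)]
            rw [PySem.List.pyRange_one_eq_nil (le_refl _)]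
            simp [gcan]
        | none =>
            have hstep : pvStepB R (acc, s) (k : Int) = (acc, (k : Int) + 1) := by
              simp [pvStepB, hf]
            rw [hstep, hb, hc, ih (k+1) _ _ hdrop (le_refl _)]
            rw [PySem.List.pyRange_one_eq_nil (le_refl _)]
            simp [gcan]
      · simp only [List.filter_cons]
        have hxb : (x == 1) = false := by simp [h1]
        rw [hxb]
        simp only [if_false, Bool.false_eq_true]
        rw [hb, hc, ih (k+1) s acc hdrop (by omega)]
        rw [← hc, hsplit]
        cases hf : (PySem.List.pyRange s (k : Int) 1).find? (fun j => PySem.List.pyGetD R j 0 == 0) with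
        | some j => simp [gcan, h1]
        | none =>
            by_cases h0 : x = 0
            · simp [gcan, h0]
            · simp [gcan, h0]

lemma gapsA_eq (road : List Int) :
    detect_gaps road = PySem.List.sorted (gcan 0 road none) (fun g => g.2) true := by
  have hA := A_loop road road 0 [] none (by simp)
  simp only [Nat.cast_zero, zero_add, List.nil_append] at hA
  unfold detect_gaps
  rcases hres : (PySem.List.pyRange 0 ((road.length : Nat) : Int) 1).foldl
      (pvStepA road) ([], none) with ⟨gs, st⟩
  rw [hres] at hA
  cases st <;> simp_all [pvFlushAt]

lemma gapsB_eq (road : List Int) :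
    detect_gaps_alt road = PySem.List.sorted (gcan 0 road none) (fun g => g.2) true := by
  have hB := B_loop road road 0 0 [] (by simp) (by simp)
  simp only [Nat.cast_zero, zero_add, List.nil_append] at hB
  rw [PySem.List.pyRange_one_eq_nil (le_refl _), List.find?_nil] at hB
  unfold detect_gaps_alt
  simp only [hB]

-- ===== VERDICT (by name: the statement is the Claim_ definition above) =====
theorem detect_gaps_spec : Claim_equal_detect_gaps := by
  intro road _
  unfold Spec_detect_gaps
  rw [gapsA_eq, gapsB_eq]
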